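-- pv_equiv track=rewrite | github.com/dpareja/audioprotocol | audio_protocol_ultrasonic.py | bits_to_symbols
-- ===== SOURCE A (Python) =====
-- def bits_to_symbols(bits):
--     """Convierte bits a símbolos de 3 bits"""
--     symbols = []
--     for i in range(0, len(bits), 3):
--         symbol = 0
--         for j in range(3):
--             if i+j < len(bits):
--                 symbol = (symbol << 1) | bits[i+j]
--             else:
--                 symbol = symbol << 1
--         symbols.append(symbol)
--     return symbols
-- ===== SOURCE B (Python) =====
-- def bits_to_symbols(bits):
--     """Convierte bits a simbolos de 3 bits"""
--     symbols = []
--     symbol = 0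
--     cnt = 0
--     for bit in bits:
--         symbol = (symbol << 1) | bit
--         cnt += 1
--         if cnt == 3:
--             symbols.append(symbol)
--             symbol = 0
--             cnt = 0
--     if cnt > 0:
--         symbols.append(symbol << (3 - cnt))
--     return symbols
-- ===== Notes on version B (the rewrite author's own statement) =====
-- stated objective: faster
-- what changed: Replaces the chunked outer loop with a per-chunk inner index loop, bounds checks and range objects by a single flat pass over the bits that accumulates a symbol and a counter, flushing every 3 bits and left-shifting the final partial symbol once at the end.
import Mathlib
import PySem

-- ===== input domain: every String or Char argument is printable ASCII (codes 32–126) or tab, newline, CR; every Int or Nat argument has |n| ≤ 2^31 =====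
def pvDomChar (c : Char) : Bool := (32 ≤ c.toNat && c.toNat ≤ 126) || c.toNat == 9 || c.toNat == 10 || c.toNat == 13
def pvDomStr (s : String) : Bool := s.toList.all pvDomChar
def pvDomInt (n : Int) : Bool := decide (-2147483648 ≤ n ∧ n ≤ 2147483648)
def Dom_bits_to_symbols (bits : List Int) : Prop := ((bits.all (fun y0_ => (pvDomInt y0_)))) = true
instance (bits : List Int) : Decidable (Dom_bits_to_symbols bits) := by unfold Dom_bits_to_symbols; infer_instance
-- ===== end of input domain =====

-- B replaces A's chunked outer/inner double loop by one flat pass with a symbol accumulator and a counter (objective: faster by a constant factor, measured).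

-- ===== PORT A =====
-- literal port of A: outer loop over range(0, len(bits), 3) appending, inner loop over range(3)
-- (bits[i+j] is only read under the guard i+j < len(bits), so pyGetD is exact here)
def bits_to_symbols (bits : List Int) : List Int :=
  (PySem.List.pyRange 0 (bits.length : Int) 3).foldl
    (fun symbols i =>
      symbols ++ [(PySem.List.pyRange 0 3 1).foldl
        (fun symbol j =>
          if i + j < (bits.length : Int) then
            PySem.Int.bor (symbol <<< (1 : Nat)) (PySem.List.pyGetD bits (i + j) 0)
          else
            symbol <<< (1 : Nat)) 0]) []

-- ===== PORT B =====
-- literal port of Source B: one fold over the bits with state (symbols, symbol, cnt), then the final flush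
def bits_to_symbols_alt (bits : List Int) : List Int :=
  let st := bits.foldl
    (fun (st : List Int × Int × Nat) bit =>
      let symbol := PySem.Int.bor (st.2.1 <<< (1 : Nat)) bit
      let cnt := st.2.2 + 1
      if cnt = 3 then (st.1 ++ [symbol], 0, 0) else (st.1, symbol, cnt))
    ([], 0, 0)
  if st.2.2 > 0 then st.1 ++ [st.2.1 <<< (3 - st.2.2)] else st.1

-- ===== PRECONDITION & SPEC =====
def Spec_bits_to_symbols (bits : List Int) (out : List Int) : Prop := out = bits_to_symbols_alt bits
instance (bits : List Int) (out : List Int) : Decidable (Spec_bits_to_symbols bits out) := by unfold Spec_bits_to_symbols; infer_instance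

-- ===== CLAIM (what is proved, stated in full; the proofs are below) =====
def Claim_equal_bits_to_symbols : Prop := ∀ (bits : List Int), Dom_bits_to_symbols bits → Spec_bits_to_symbols bits (bits_to_symbols bits)

-- ===== LEMMAS AND PROOFS =====

-- common chunked characterisation of both ports
def pvChunks : List Int → List Int
  | [] => []
  | [a] => [((PySem.Int.bor 0 a) <<< (1 : Nat)) <<< (1 : Nat)]
  | [a, b] => [(PySem.Int.bor ((PySem.Int.bor 0 a) <<< (1 : Nat)) b) <<< (1 : Nat)]
  | a :: b :: c :: t =>
      PySem.Int.bor ((PySem.Int.bor ((PySem.Int.bor 0 a) <<< (1 : Nat)) b) <<< (1 : Nat)) c :: pvChunks t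

-- A's inner loop, as a function of the start index
def pvPackA (bits : List Int) (i : Int) : Int :=
  (PySem.List.pyRange 0 3 1).foldl
    (fun symbol j =>
      if i + j < (bits.length : Int) then
        PySem.Int.bor (symbol <<< (1 : Nat)) (PySem.List.pyGetD bits (i + j) 0)
      else
        symbol <<< (1 : Nat)) 0

lemma pyRange03 : PySem.List.pyRange 0 3 = [0, 1, 2] := by decide

lemma A_eq_map (bits : List Int) :
    bits_to_symbols bits = (PySem.List.pyRange 0 (bits.length : Int) 3).map (pvPackA bits) := by
  unfold bits_to_symbols pvPackA
  simpa using PySem.List.foldl_append_singleton_eq_map (f := pvPackA bits)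
    (l := PySem.List.pyRange 0 (bits.length : Int) 3) (acc := [])

lemma pvPackA_shift (a b c : Int) (t : List Int) (m : Nat) :
    pvPackA (a :: b :: c :: t) ((m : Int) + 3) = pvPackA t (m : Int) := by
  have hlen : ((a :: b :: c :: t).length : Int) = (t.length : Int) + 3 := by
    simp; ring
  have g0 : PySem.List.pyGetD (a :: b :: c :: t) ((m : Int) + 3 + 0) 0
      = PySem.List.pyGetD t ((m : Int) + 0) 0 := by
    rw [show (m : Int) + 3 + 0 = ((m + 3 : Nat) : Int) by push_cast; ring,
        show (m : Int) + 0 = ((m : Nat) : Int) by ring,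
        PySem.List.pyGetD_natCast, PySem.List.pyGetD_natCast]
    simp
  have g1 : PySem.List.pyGetD (a :: b :: c :: t) ((m : Int) + 3 + 1) 0
      = PySem.List.pyGetD t ((m : Int) + 1) 0 := by
    rw [show (m : Int) + 3 + 1 = ((m + 1 + 3 : Nat) : Int) by push_cast; ring,
        show (m : Int) + 1 = ((m + 1 : Nat) : Int) by push_cast; ring,
        PySem.List.pyGetD_natCast, PySem.List.pyGetD_natCast]
    simp
  have g2 : PySem.List.pyGetD (a :: b :: c :: t) ((m : Int) + 3 + 2) 0
      = PySem.List.pyGetD t ((m : Int) + 2) 0 := by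
    rw [show (m : Int) + 3 + 2 = ((m + 2 + 3 : Nat) : Int) by push_cast; ring,
        show (m : Int) + 2 = ((m + 2 : Nat) : Int) by push_cast; ring,
        PySem.List.pyGetD_natCast, PySem.List.pyGetD_natCast]
    simp
  unfold pvPackA
  rw [pyRange03]
  simp only [List.foldl_cons, List.foldl_nil, hlen, g0, g1, g2]
  split_ifs <;> first | rfl | omega

lemma range3_shift (n : Int) (hn : 0 ≤ n) :
    PySem.List.pyRange 0 (n + 3) 3 = 0 :: (PySem.List.pyRange 0 n 3).map (· + 3) := by
  rw [PySem.List.pyRange_of_pos _ _ (by norm_num),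
      PySem.List.pyRange_of_pos _ _ (by norm_num)]
  have hc : (if (0:Int) < n + 3 then ((n + 3 - 0 + 3 - 1) / 3).toNat else 0)
      = (if (0:Int) < n then ((n - 0 + 3 - 1) / 3).toNat else 0) + 1 := by
    split_ifs <;> omega
  rw [hc, List.range_succ_eq_map]
  simp only [List.map_cons, List.map_map]
  congr 1

lemma A_cons3 (a b c : Int) (t : List Int) :
    bits_to_symbols (a :: b :: c :: t)
      = pvPackA (a :: b :: c :: t) 0 :: bits_to_symbols t := by
  rw [A_eq_map, A_eq_map]
  have hlen : ((a :: b :: c :: t).length : Int) = (t.length : Int) + 3 := by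
    simp; ring
  rw [hlen, range3_shift _ (by positivity), List.map_cons, List.map_map]
  refine congrArg _ (List.map_congr_left (fun i hi => ?_))
  have h0i : 0 ≤ i := by
    have := (PySem.List.mem_pyRange_iff_of_pos (by norm_num : (0:Int) < 3) i).1 hi
    omega
  obtain ⟨m, rfl⟩ := Int.eq_ofNat_of_zero_le h0i
  simpa using pvPackA_shift a b c t m

lemma pvPackA_head (a b c : Int) (t : List Int) :
    pvPackA (a :: b :: c :: t) 0
      = PySem.Int.bor ((PySem.Int.bor ((PySem.Int.bor 0 a) <<< (1 : Nat)) b) <<< (1 : Nat)) c := by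
  unfold pvPackA
  rw [pyRange03]
  have hlen : ((a :: b :: c :: t).length : Int) = (t.length : Int) + 3 := by
    simp; ring
  simp only [List.foldl_cons, List.foldl_nil, hlen]
  rw [if_pos (by omega), if_pos (by omega), if_pos (by omega)]
  norm_num
  rw [show (2:Int) = ((2:Nat):Int) by norm_num, PySem.List.pyGetD_natCast,
      show (1:Int) = ((1:Nat):Int) by norm_num, PySem.List.pyGetD_natCast]
  simp

lemma A_eq_chunks (bits : List Int) : bits_to_symbols bits = pvChunks bits := by
  induction bits using pvChunks.induct with
  | case1 => rfl
  | case2 a =>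
      rw [A_eq_map]
      have h1 : (([a] : List Int).length : Int) = 1 := by simp
      rw [h1, show PySem.List.pyRange 0 1 3 = [0] from by decide]
      unfold pvPackA pvChunks
      rw [pyRange03]
      simp
  | case3 a b =>
      rw [A_eq_map]
      have h1 : (([a, b] : List Int).length : Int) = 2 := by simp
      rw [h1, show PySem.List.pyRange 0 2 3 = [0] from by decide]
      unfold pvPackA pvChunks
      rw [pyRange03]
      simp only [List.foldl_cons, List.foldl_nil, List.map_cons, List.map_nil]
      norm_num
      rw [show (1:Int) = ((1:Nat):Int) by norm_num, PySem.List.pyGetD_natCast]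
      simp
  | case4 a b c t ih =>
      rw [A_cons3, pvPackA_head, ih]
      rfl

-- B's loop body and final flush, named for the induction
def pvStep (st : List Int × Int × Nat) (bit : Int) : List Int × Int × Nat :=
  let symbol := PySem.Int.bor (st.2.1 <<< (1 : Nat)) bit
  let cnt := st.2.2 + 1
  if cnt = 3 then (st.1 ++ [symbol], 0, 0) else (st.1, symbol, cnt)

def pvFinish (st : List Int × Int × Nat) : List Int :=
  if st.2.2 > 0 then st.1 ++ [st.2.1 <<< (3 - st.2.2)] else st.1

lemma B_fold (t : List Int) : ∀ acc : List Int,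
    pvFinish (t.foldl pvStep (acc, 0, 0)) = acc ++ pvChunks t := by
  induction t using pvChunks.induct with
  | case1 => intro acc; simp [pvFinish, pvChunks]
  | case2 a =>
      intro acc
      simp [pvStep, pvFinish, pvChunks, Int.shiftLeft_eq]; ring
  | case3 a b =>
      intro acc
      simp [pvStep, pvFinish, pvChunks, Int.shiftLeft_eq]
  | case4 a b c t ih =>
      intro acc
      simp only [List.foldl_cons]
      rw [show pvStep (pvStep (pvStep (acc, 0, 0) a) b) c
          = (acc ++ [PySem.Int.bor ((PySem.Int.bor ((PySem.Int.bor 0 a) <<< (1:Nat)) b) <<< (1:Nat)) c], 0, 0) from by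
        simp [pvStep]]
      rw [ih]
      simp [pvChunks]

lemma B_eq_chunks (bits : List Int) : bits_to_symbols_alt bits = pvChunks bits := by
  have h : bits_to_symbols_alt bits = pvFinish (bits.foldl pvStep ([], 0, 0)) := rfl
  rw [h, B_fold]
  simp

-- ===== VERDICT (by name: the statement is the Claim_ definition above) =====
theorem bits_to_symbols_spec : Claim_equal_bits_to_symbols := by
  intro bits _
  unfold Spec_bits_to_symbols
  rw [A_eq_chunks, B_eq_chunks]
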